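-- pv_equiv track=rewrite | github.com/AbhishekPonnaboina/Competitive-Coding-Solutions | Difficulty: Medium/Subset II/subset-ii.py | printUniqueSubset
-- ===== SOURCE A (Python) =====
-- def printUniqueSubset(arr):
--     # Code here
--     arr.sort()
--     res = []
--     sub = []
--     n = len(arr)
--
--     def generateSubSets(arr,res,sub,idx,n):
--         res.append(sub.copy())
--         for i in range(idx,n):
--             if i > idx and arr[i] == arr[i-1]:
--                 continue
--             sub.append(arr[i])
--             generateSubSets(arr,res,sub,i+1,n)
--             sub.pop()
--
--     generateSubSets(arr,res,sub,0,n)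
--
--     return res
-- ===== SOURCE B (Python) =====
-- def printUniqueSubset(arr):
--     arr.sort()  # same in-place sort side effect as A
--
--     def go(xs):
--         # all unique subsets of the sorted list xs, in DFS pre-order:
--         # the empty subset first, then subsets containing xs[0], then nonempty subsets
--         # of the elements after the leading run of xs[0].
--         if not xs:
--             return [[]]
--         v = xs[0]
--         with_v = [[v] + s for s in go(xs[1:])]
--         j = 1
--         while j < len(xs) and xs[j] == v:
--             j += 1
--         without_v = go(xs[j:])[1:]
--         return [[]] + with_v + without_v
--
--     return go(arr)
-- ===== Notes on version B (the rewrite author's own statement) =====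
-- stated objective: simpler
-- what changed: Replaces A's index-based backtracking DFS with mutable res/sub accumulators and an in-loop duplicate-skip test by a pure structural recursion on the sorted list: the empty subset, then the head consed onto each subset of the tail, then the nonempty subsets of the list after the leading run of the head.
import Mathlib
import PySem

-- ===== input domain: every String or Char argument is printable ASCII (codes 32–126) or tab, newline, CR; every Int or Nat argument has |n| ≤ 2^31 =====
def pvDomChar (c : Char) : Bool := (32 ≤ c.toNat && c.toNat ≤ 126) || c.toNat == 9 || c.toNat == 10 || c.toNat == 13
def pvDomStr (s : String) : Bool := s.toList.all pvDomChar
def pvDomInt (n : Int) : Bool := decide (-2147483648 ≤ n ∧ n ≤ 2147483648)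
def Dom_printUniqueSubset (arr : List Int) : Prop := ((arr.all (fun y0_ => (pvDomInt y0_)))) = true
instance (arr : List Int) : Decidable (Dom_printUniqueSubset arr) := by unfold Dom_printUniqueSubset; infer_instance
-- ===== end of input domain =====

-- B replaces A's index-based backtracking DFS (mutable res/sub, duplicate-skip inside the
-- index loop) by a pure structural recursion on the sorted list; both Pythons sort the
-- argument in place (same side effect), the equivalence proved is about the return value.

-- ===== PORT A =====

-- arr[i]; every access in A has 0 ≤ i < len(arr), where getD is exact
def pyAt (arr : List Int) (i : Nat) : Int := arr.getD i 0

mutual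
-- generateSubSets(arr,res,sub,idx,n): returns the block of subsets it appends to res
def genA (arr sub : List Int) (idx n : Nat) : List (List Int) :=
  sub :: genLoopA arr sub idx idx n
  termination_by (n - idx, 1)
  decreasing_by omega
-- the 'for i in range(idx,n)' loop, current counter i
def genLoopA (arr sub : List Int) (idx i n : Nat) : List (List Int) :=
  if i < n then
    if idx < i ∧ pyAt arr i == pyAt arr (i - 1) then
      genLoopA arr sub idx (i + 1) n
    else
      genA arr (sub ++ [pyAt arr i]) (i + 1) n ++ genLoopA arr sub idx (i + 1) n
  else []
  termination_by (n - i, 0)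
  decreasing_by all_goals omega
end

def printUniqueSubset (arr : List Int) : List (List Int) :=
  let a := PySem.List.sorted arr (fun x => x) false   -- arr.sort()
  genA a [] 0 a.length

-- ===== PORT B =====

-- go(xs) from Source B: the 'while' loop that skips the leading run of v in xs[1:] followed
-- by the slice xs[j:] is dropWhile (· == v) on the tail
def goB : List Int → List (List Int)
  | [] => [[]]
  | v :: t =>
      [] :: ((goB t).map (fun s => v :: s) ++ (goB (t.dropWhile (fun x => x == v))).tail)
termination_by xs => xs.length
decreasing_by
  · simp
  · have := List.length_dropWhile_le (fun x => x == v) t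
    simp; omega

def printUniqueSubset_alt (arr : List Int) : List (List Int) :=
  goB (PySem.List.sorted arr (fun x => x) false)

-- ===== PRECONDITION & SPEC =====
def Spec_printUniqueSubset (arr : List Int) (out : List (List Int)) : Prop := out = printUniqueSubset_alt arr
instance (arr : List Int) (out : List (List Int)) : Decidable (Spec_printUniqueSubset arr out) := by unfold Spec_printUniqueSubset; infer_instance

-- ===== CLAIM (what is proved, stated in full; the proofs are below) =====
def Claim_equal_printUniqueSubset : Prop := ∀ (arr : List Int), Dom_printUniqueSubset arr → Spec_printUniqueSubset arr (printUniqueSubset arr)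

-- ===== LEMMAS AND PROOFS =====

-- combined invariant, strong induction on the remaining length k
theorem gen_goB (k : Nat) :
    (∀ (arr sub : List Int) (idx : Nat), idx ≤ arr.length → arr.length - idx ≤ k →
      genA arr sub idx arr.length = (goB (arr.drop idx)).map (fun s => sub ++ s)) ∧
    (∀ (arr sub : List Int) (idx i : Nat), idx < i → i ≤ arr.length → arr.length - i ≤ k →
      genLoopA arr sub idx i arr.length =
        ((goB ((arr.drop i).dropWhile (fun x => x == pyAt arr (i - 1)))).tail).map
          (fun s => sub ++ s)) := by
  induction k with
  | zero =>
      constructor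
      · intro arr sub idx hle hk
        have hidx : idx = arr.length := by omega
        subst hidx
        rw [genA, genLoopA]
        simp [goB]
      · intro arr sub idx i hidx hi hk
        have hieq : i = arr.length := by omega
        subst hieq
        rw [genLoopA]
        simp [goB]
  | succ k ih =>
      constructor
      · intro arr sub idx hle hk
        by_cases h : idx < arr.length
        · have hdrop : arr.drop idx = arr[idx] :: arr.drop (idx + 1) :=
            List.drop_eq_getElem_cons h
          have hA := ih.1 arr (sub ++ [pyAt arr idx]) (idx + 1) (by omega) (by omega)
          have hL := ih.2 arr sub idx (idx + 1) (by omega) (by omega) (by omega)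
          rw [genA, genLoopA]
          simp only [if_pos h, Nat.add_sub_cancel] at *
          rw [if_neg (by simp), hA, hL, hdrop, goB]
          simp [pyAt, List.getD_eq_getElem?_getD, List.map_map, Function.comp_def, h]
        · have hidx : idx = arr.length := by omega
          subst hidx
          rw [genA, genLoopA]
          simp [goB]
      · intro arr sub idx i hidx hi hk
        by_cases h : i < arr.length
        · have hdrop : arr.drop i = arr[i] :: arr.drop (i + 1) :=
            List.drop_eq_getElem_cons h
          have hgi : pyAt arr i = arr[i] := by
            simp [pyAt, List.getD_eq_getElem?_getD, h]
          by_cases heq : pyAt arr i = pyAt arr (i - 1)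
          · have hL := ih.2 arr sub idx (i + 1) (by omega) (by omega) (by omega)
            rw [genLoopA]
            simp only [if_pos h, Nat.add_sub_cancel] at *
            rw [if_pos ⟨hidx, by simp [heq]⟩, hL, hdrop, List.dropWhile_cons,
              if_pos (by simp [hgi ▸ heq]), heq]
          · have hA := ih.1 arr (sub ++ [pyAt arr i]) (i + 1) (by omega) (by omega)
            have hL := ih.2 arr sub idx (i + 1) (by omega) (by omega) (by omega)
            rw [genLoopA]
            simp only [if_pos h, Nat.add_sub_cancel] at *
            rw [if_neg (by simp [heq]), hA, hL, hdrop, List.dropWhile_cons,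
              if_neg (by simp [hgi ▸ heq]), goB]
            simp [hgi, List.map_map, Function.comp_def]
        · have hieq : i = arr.length := by omega
          subst hieq
          rw [genLoopA]
          simp [goB]

theorem printUniqueSubset_spec : Claim_equal_printUniqueSubset := by
  intro arr _
  unfold Spec_printUniqueSubset printUniqueSubset printUniqueSubset_alt
  simp only []
  have h := (gen_goB (PySem.List.sorted arr (fun x => x) false).length).1
    (PySem.List.sorted arr (fun x => x) false) [] 0 (by omega) (by omega)
  simpa using h
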